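-- pv_equiv track=rewrite | github.com/snowcrash-labs/data_preprocessing | dataset_analysis/calculate_audio_duration.py | get_range_bin
-- ===== SOURCE A (Python) =====
-- def get_range_bin(track_count: int) -> str:
--     """Categorize track count into a range bin."""
--     ranges = [
--         (1, 2, "1 track"),
--         (2, 5, "2-5 tracks"),
--         (5, 10, "5-10 tracks"),
--         (10, 30, "10-30 tracks"),
--         (30, 100, "30-100 tracks"),
--         (100, float('inf'), "100+ tracks")
--     ]
--
--     for min_tracks, max_tracks, desc in ranges:
--         if max_tracks == float('inf'):
--             if track_count >= min_tracks:
--                 return desc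
--         else:
--             if min_tracks <= track_count < max_tracks:
--                 return desc
--
--     return "unknown"
-- ===== SOURCE B (Python) =====
-- import bisect
--
-- _THRESHOLDS = [1, 2, 5, 10, 30, 100]
-- _LABELS = ["unknown", "1 track", "2-5 tracks", "5-10 tracks",
--            "10-30 tracks", "30-100 tracks", "100+ tracks"]
--
-- def get_range_bin(track_count: int) -> str:
--     """Categorize track count into a range bin."""
--     return _LABELS[bisect.bisect_right(_THRESHOLDS, track_count)]
-- ===== Notes on version B (the rewrite author's own statement) =====
-- stated objective: idiomatic
-- what changed: Replaces the sequential scan over (min,max,label) interval tuples (with a float('inf') sentinel) by a bisect_right binary search over a sorted list of lower bounds indexing into a parallel labels array.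
import Mathlib
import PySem

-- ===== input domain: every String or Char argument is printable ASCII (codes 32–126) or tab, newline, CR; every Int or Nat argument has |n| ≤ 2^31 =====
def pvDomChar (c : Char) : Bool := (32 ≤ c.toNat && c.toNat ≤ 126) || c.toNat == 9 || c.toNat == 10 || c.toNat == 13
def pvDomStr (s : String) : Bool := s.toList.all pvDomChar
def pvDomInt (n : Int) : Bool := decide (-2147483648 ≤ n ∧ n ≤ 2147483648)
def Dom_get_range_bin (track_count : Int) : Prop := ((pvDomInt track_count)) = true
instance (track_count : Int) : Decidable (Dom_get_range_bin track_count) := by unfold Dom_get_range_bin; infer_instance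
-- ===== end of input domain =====

-- B replaces A's sequential scan over (min, max, label) interval tuples by a
-- bisect_right insertion-point lookup into a parallel labels list (idiomatic).

-- ===== PORT A =====
-- A's `ranges` list; max_tracks = none stands for float('inf').
def pvRangesA : List (Int × Option Int × String) :=
  [(1, some 2, "1 track"),
   (2, some 5, "2-5 tracks"),
   (5, some 10, "5-10 tracks"),
   (10, some 30, "10-30 tracks"),
   (30, some 100, "30-100 tracks"),
   (100, none, "100+ tracks")]

-- the `for min_tracks, max_tracks, desc in ranges` loop with its early returns
def pvLoopA (track_count : Int) : List (Int × Option Int × String) → String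
  | [] => "unknown"
  | (min_tracks, max_tracks, desc) :: rest =>
    match max_tracks with
    | none => if track_count ≥ min_tracks then desc else pvLoopA track_count rest
    | some mx => if min_tracks ≤ track_count ∧ track_count < mx then desc
                 else pvLoopA track_count rest

def get_range_bin (track_count : Int) : String :=
  pvLoopA track_count pvRangesA

-- ===== PORT B =====
def pvThresholds : List Int := [1, 2, 5, 10, 30, 100]
def pvLabels : List String :=
  ["unknown", "1 track", "2-5 tracks", "5-10 tracks", "10-30 tracks", "30-100 tracks", "100+ tracks"]

-- bisect.bisect_right (a standard-library call of Source B), ported by its specification: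
-- on a sorted list the insertion point is the number of elements ≤ x.
def pvInsertionPoint (xs : List Int) (x : Int) : Nat :=
  xs.countP (fun a => decide (a ≤ x))

def get_range_bin_alt (track_count : Int) : String :=
  pvLabels.getD (pvInsertionPoint pvThresholds track_count) ""

-- ===== PRECONDITION & SPEC =====
def Spec_get_range_bin (track_count : Int) (out : String) : Prop := out = get_range_bin_alt track_count
instance (track_count : Int) (out : String) : Decidable (Spec_get_range_bin track_count out) := by unfold Spec_get_range_bin; infer_instance

-- ===== CLAIM (what is proved, stated in full; the proofs are below) =====
def Claim_equal_get_range_bin : Prop := ∀ (track_count : Int), Dom_get_range_bin track_count → Spec_get_range_bin track_count (get_range_bin track_count)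

-- ===== LEMMAS AND PROOFS =====

-- ===== VERDICT (by name: the statement is the Claim_ definition above) =====
theorem get_range_bin_spec : Claim_equal_get_range_bin := by
  intro t _
  unfold Spec_get_range_bin get_range_bin get_range_bin_alt pvInsertionPoint
  simp only [pvRangesA, pvLoopA, pvThresholds, pvLabels,
    List.countP_cons, List.countP_nil, decide_eq_true_eq]
  by_cases c1 : t < 1
  · simp [show ¬((1:Int) ≤ t) from by omega, show t < (1:Int) from by omega, show ¬((2:Int) ≤ t) from by omega, show t < (2:Int) from by omega, show ¬((5:Int) ≤ t) from by omega, show t < (5:Int) from by omega, show ¬((10:Int) ≤ t) from by omega, show t < (10:Int) from by omega, show ¬((30:Int) ≤ t) from by omega, show t < (30:Int) from by omega, show ¬((100:Int) ≤ t) from by omega, show t < (100:Int) from by omega]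
  by_cases c2 : t < 2
  · simp [show (1:Int) ≤ t from by omega, show ¬(t < (1:Int)) from by omega, show ¬((2:Int) ≤ t) from by omega, show t < (2:Int) from by omega, show ¬((5:Int) ≤ t) from by omega, show t < (5:Int) from by omega, show ¬((10:Int) ≤ t) from by omega, show t < (10:Int) from by omega, show ¬((30:Int) ≤ t) from by omega, show t < (30:Int) from by omega, show ¬((100:Int) ≤ t) from by omega, show t < (100:Int) from by omega]
  by_cases c3 : t < 5
  · simp [show (1:Int) ≤ t from by omega, show ¬(t < (1:Int)) from by omega, show (2:Int) ≤ t from by omega, show ¬(t < (2:Int)) from by omega, show ¬((5:Int) ≤ t) from by omega, show t < (5:Int) from by omega, show ¬((10:Int) ≤ t) from by omega, show t < (10:Int) from by omega, show ¬((30:Int) ≤ t) from by omega, show t < (30:Int) from by omega, show ¬((100:Int) ≤ t) from by omega, show t < (100:Int) from by omega]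
  by_cases c4 : t < 10
  · simp [show (1:Int) ≤ t from by omega, show ¬(t < (1:Int)) from by omega, show (2:Int) ≤ t from by omega, show ¬(t < (2:Int)) from by omega, show (5:Int) ≤ t from by omega, show ¬(t < (5:Int)) from by omega, show ¬((10:Int) ≤ t) from by omega, show t < (10:Int) from by omega, show ¬((30:Int) ≤ t) from by omega, show t < (30:Int) from by omega, show ¬((100:Int) ≤ t) from by omega, show t < (100:Int) from by omega]
  by_cases c5 : t < 30
  · simp [show (1:Int) ≤ t from by omega, show ¬(t < (1:Int)) from by omega, show (2:Int) ≤ t from by omega, show ¬(t < (2:Int)) from by omega, show (5:Int) ≤ t from by omega, show ¬(t < (5:Int)) from by omega, show (10:Int) ≤ t from by omega, show ¬(t < (10:Int)) from by omega, show ¬((30:Int) ≤ t) from by omega, show t < (30:Int) from by omega, show ¬((100:Int) ≤ t) from by omega, show t < (100:Int) from by omega]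
  by_cases c6 : t < 100
  · simp [show (1:Int) ≤ t from by omega, show ¬(t < (1:Int)) from by omega, show (2:Int) ≤ t from by omega, show ¬(t < (2:Int)) from by omega, show (5:Int) ≤ t from by omega, show ¬(t < (5:Int)) from by omega, show (10:Int) ≤ t from by omega, show ¬(t < (10:Int)) from by omega, show (30:Int) ≤ t from by omega, show ¬(t < (30:Int)) from by omega, show ¬((100:Int) ≤ t) from by omega, show t < (100:Int) from by omega]
  · simp [show (1:Int) ≤ t from by omega, show ¬(t < (1:Int)) from by omega, show (2:Int) ≤ t from by omega, show ¬(t < (2:Int)) from by omega, show (5:Int) ≤ t from by omega, show ¬(t < (5:Int)) from by omega, show (10:Int) ≤ t from by omega, show ¬(t < (10:Int)) from by omega, show (30:Int) ≤ t from by omega, show ¬(t < (30:Int)) from by omega, show (100:Int) ≤ t from by omega, show ¬(t < (100:Int)) from by omega]
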